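-- pv_equiv track=rewrite | github.com/ChinemeremChigbo/CodingProblems | Google/Kick Start/2021/Round G/C.py | bfs
-- ===== SOURCE A (Python) =====
-- def bfs(total,cap,trees):
--     bfsList = [(0,-1,0)]
--     count = 0
--
--     while bfsList:
--         newList = []
--         for comb,index,skips in bfsList:
--             if comb == cap: return count
--             for num in range(index + 1, total):
--                 if comb + trees[num] <= cap:
--                     if num == index + 1:
--                         newList.append((comb + trees[num], num, 0))
--                     elif skips == 0:
--                         newList.append((comb + trees[num], num, 1))
--         bfsList = newList
--         count += 1
--
--     return -1
-- ===== SOURCE B (Python) =====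
-- def bfs(total, cap, trees):
--     # Iterative deepening: for each pick-count k in increasing order, a
--     # depth-first search decides whether some valid sequence of exactly k
--     # picks sums to cap; the first k that succeeds is the answer.
--     def reach(comb, index, skips, k):
--         if k == 0:
--             return comb == cap
--         for num in range(index + 1, total):
--             c = comb + trees[num]
--             if c <= cap:
--                 if num == index + 1:
--                     if reach(c, num, 0, k - 1):
--                         return True
--                 elif skips == 0:
--                     if reach(c, num, 1, k - 1):
--                         return True
--         return False
--
--     for k in range(max(total, 0) + 1):
--         if reach(0, -1, 0, k):
--             return k
--     return -1
-- ===== Notes on version B (the rewrite author's own statement) =====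
-- stated objective: alternative
-- what changed: A does a level-synchronous breadth-first search, materialising each whole level of (comb,index,skips) states as a list before checking it; B replaces the frontier-list BFS by iterative deepening: a recursive depth-first search reach(comb,index,skips,k) decides whether exactly k picks can sum to cap, tried for k = 0,1,... — no frontier data structure at all.
import Mathlib
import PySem

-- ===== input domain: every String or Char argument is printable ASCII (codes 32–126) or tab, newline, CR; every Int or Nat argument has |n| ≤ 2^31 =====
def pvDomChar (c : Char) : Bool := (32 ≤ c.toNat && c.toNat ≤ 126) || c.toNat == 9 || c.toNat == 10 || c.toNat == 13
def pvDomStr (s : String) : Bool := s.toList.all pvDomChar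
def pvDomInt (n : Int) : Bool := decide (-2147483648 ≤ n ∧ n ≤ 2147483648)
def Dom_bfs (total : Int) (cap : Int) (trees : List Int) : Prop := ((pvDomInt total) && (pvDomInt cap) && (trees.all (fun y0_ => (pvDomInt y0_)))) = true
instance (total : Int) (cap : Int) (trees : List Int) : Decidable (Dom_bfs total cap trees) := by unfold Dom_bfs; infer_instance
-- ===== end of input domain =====

-- B replaces A's level-synchronous BFS (a frontier list rebuilt level by level) by
-- iterative deepening: for each pick-count k in increasing order a recursive
-- depth-first search decides whether some valid sequence of exactly k picks sums
-- to cap; the first succeeding k is the answer (same value, different traversal).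

-- A state of the search: (comb, index, skips), exactly A's tuples.
abbrev Tri : Type := Int × Int × Int

-- ===== PORT A =====
-- inner `for num in range(index+1, total)` loop body of A (appends to newList)
def aExpand (total : Int) (cap : Int) (trees : List Int) (comb index skips : Int)
    (newList : List Tri) : List Tri :=
  (PySem.List.pyRange (index + 1) total 1).foldl (fun acc num =>
    if comb + PySem.List.pyGetD trees num 0 ≤ cap then
      if num == index + 1 then acc ++ [(comb + PySem.List.pyGetD trees num 0, num, (0 : Int))]
      else if skips == 0 then acc ++ [(comb + PySem.List.pyGetD trees num 0, num, (1 : Int))]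
      else acc
    else acc) newList

-- `for comb,index,skips in bfsList` body: `none` = the `return count` was hit
def aLevel (total : Int) (cap : Int) (trees : List Int) (newList : List Tri) :
    List Tri → Option (List Tri)
  | [] => some newList
  | s :: rest =>
    if s.1 == cap then none
    else aLevel total cap trees (aExpand total cap trees s.1 s.2.1 s.2.2 newList) rest

-- `while bfsList:` loop; fuel only makes the recursion structural (total.toNat + 2 levels
-- always suffice: a state of level k ≥ 1 has index ≥ k - 1 and index < total)
def aLoop (total : Int) (cap : Int) (trees : List Int) : Nat → List Tri → Int → Int
  | 0, _, _ => -1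
  | fuel + 1, bfsList, count =>
    match bfsList with
    | [] => -1
    | _ :: _ =>
      match aLevel total cap trees [] bfsList with
      | none => count
      | some newList => aLoop total cap trees fuel newList (count + 1)

def bfs (total : Int) (cap : Int) (trees : List Int) : Int :=
  aLoop total cap trees (total.toNat + 2) [(0, -1, 0)] 0

-- ===== PORT B =====
-- the inner DFS `reach(comb, index, skips, k)` of Source B (recursion on k)
def reachB (total cap : Int) (trees : List Int) : Int → Int → Int → Nat → Bool
  | comb, _, _, 0 => comb == cap
  | comb, index, skips, k + 1 =>
    (PySem.List.pyRange (index + 1) total 1).any (fun num =>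
      if comb + PySem.List.pyGetD trees num 0 ≤ cap then
        if num == index + 1 then
          reachB total cap trees (comb + PySem.List.pyGetD trees num 0) num 0 k
        else if skips == 0 then
          reachB total cap trees (comb + PySem.List.pyGetD trees num 0) num 1 k
        else false
      else false)

-- `for k in range(max(total, 0) + 1): if reach(0,-1,0,k): return k` / `return -1`
def bfs_alt (total : Int) (cap : Int) (trees : List Int) : Int :=
  match (List.range ((max total 0).toNat + 1)).find?
      (fun k => reachB total cap trees 0 (-1) 0 k) with
  | some k => (k : Int)
  | none => -1

-- ===== PRECONDITION & SPEC =====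
-- Pre_ is exactly where Python A returns normally: when total > len(trees), A raises
-- IndexError — unless cap = 0, where it returns 0 before ever indexing (and so does B).
def Pre_bfs (total : Int) (cap : Int) (trees : List Int) : Prop :=
  total ≤ (trees.length : Int) ∨ cap = 0
instance (total : Int) (cap : Int) (trees : List Int) : Decidable (Pre_bfs total cap trees) := by
  unfold Pre_bfs; infer_instance

def pvWitness_bfs : Int × Int × List Int := (3, 7, [3, 4, 5])

def Spec_bfs (total : Int) (cap : Int) (trees : List Int) (out : Int) : Prop :=
  out = bfs_alt total cap trees
instance (total : Int) (cap : Int) (trees : List Int) (out : Int) :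
    Decidable (Spec_bfs total cap trees out) := by unfold Spec_bfs; infer_instance

-- ===== CLAIM (what is proved, stated in full; the proofs are below) =====
def Claim_equal_bfs : Prop := ∀ (total : Int) (cap : Int) (trees : List Int),
  Dom_bfs total cap trees → Pre_bfs total cap trees → Spec_bfs total cap trees (bfs total cap trees)

-- ===== LEMMAS AND PROOFS =====

-- the states the inner loop of A appends for a single value of num
def eF (total cap : Int) (trees : List Int) (comb index skips : Int) (num : Int) : List Tri :=
  if comb + PySem.List.pyGetD trees num 0 ≤ cap then
    if num == index + 1 then [(comb + PySem.List.pyGetD trees num 0, num, (0 : Int))]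
    else if skips == 0 then [(comb + PySem.List.pyGetD trees num 0, num, (1 : Int))]
    else []
  else []

def succsL (total cap : Int) (trees : List Int) (s : Tri) : List Tri :=
  (PySem.List.pyRange (s.2.1 + 1) total 1).flatMap (eF total cap trees s.1 s.2.1 s.2.2)

-- levels of A's (undeduplicated) BFS: states reachable in exactly k picks
def levels (total cap : Int) (trees : List Int) : Nat → List Tri
  | 0 => [(0, -1, 0)]
  | k + 1 => (levels total cap trees k).flatMap (succsL total cap trees)

def hasCap (total cap : Int) (trees : List Int) (m : Nat) : Prop :=
  ∃ s ∈ levels total cap trees m, s.1 = cap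

-- first level containing a state with comb = cap (bounded search is exhaustive, see levels_empty)
def firstCap (total cap : Int) (trees : List Int) : Option Nat :=
  (List.range (total.toNat + 2)).find?
    (fun m => (levels total cap trees m).any (fun s => s.1 == cap))

theorem find?_range_eq_some {p : Nat → Bool} {n m : Nat} :
    (List.range n).find? p = some m ↔ m < n ∧ p m = true ∧ ∀ k < m, p k = false := by
  induction n generalizing m with
  | zero => simp
  | succ n ih =>
    rw [List.range_succ, List.find?_append]
    rcases h : (List.range n).find? p with _ | m'
    · have hnone : ∀ k < n, p k = false := by
        intro k hk
        have := List.find?_eq_none.mp h k (List.mem_range.mpr hk)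
        simpa using this
      simp only [Option.none_or]
      constructor
      · intro hm
        by_cases hpn : p n = true
        · rw [List.find?_cons_of_pos hpn] at hm
          injection hm with hm
          subst hm
          exact ⟨by omega, hpn, hnone⟩
        · rw [List.find?_cons_of_neg (by simpa using hpn), List.find?_nil] at hm
          exact absurd hm (by simp)
      · rintro ⟨hlt, hpm, hmin⟩
        have hmn : m = n := by
          by_contra hne
          have hml : m < n := by omega
          rw [hnone m hml] at hpm
          exact absurd hpm (by simp)
        subst hmn
        rw [List.find?_cons_of_pos hpm]
    · obtain ⟨hm'n, hpm', hmin'⟩ := ih.mp h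
      simp only [Option.some_or]
      constructor
      · intro hm
        injection hm with hm
        subst hm
        exact ⟨by omega, hpm', hmin'⟩
      · rintro ⟨hlt, hpm, hmin⟩
        have heq : m = m' := by
          rcases lt_trichotomy m m' with h1 | h1 | h1
          · rw [hmin' m h1] at hpm; exact absurd hpm (by simp)
          · exact h1
          · rw [hmin m' h1] at hpm'; exact absurd hpm' (by simp)
        rw [heq]

theorem find?_range_eq_none {p : Nat → Bool} {n : Nat} :
    (List.range n).find? p = none ↔ ∀ k < n, p k = false := by
  rw [List.find?_eq_none]
  constructor
  · intro h k hk
    simpa using h k (List.mem_range.mpr hk)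
  · intro h x hx
    simp [h x (List.mem_range.mp hx)]

theorem foldl_eF (total cap : Int) (trees : List Int) (comb index skips : Int) :
    ∀ (l : List Int) (acc : List Tri),
    l.foldl (fun acc num =>
      if comb + PySem.List.pyGetD trees num 0 ≤ cap then
        if num == index + 1 then acc ++ [(comb + PySem.List.pyGetD trees num 0, num, (0 : Int))]
        else if skips == 0 then acc ++ [(comb + PySem.List.pyGetD trees num 0, num, (1 : Int))]
        else acc
      else acc) acc = acc ++ l.flatMap (eF total cap trees comb index skips) := by
  intro l
  induction l with
  | nil => intro acc; simp
  | cons a l ih =>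
    intro acc
    rw [List.foldl_cons, ih, List.flatMap_cons]
    have hstep : (if comb + PySem.List.pyGetD trees a 0 ≤ cap then
        if a == index + 1 then acc ++ [(comb + PySem.List.pyGetD trees a 0, a, (0 : Int))]
        else if skips == 0 then acc ++ [(comb + PySem.List.pyGetD trees a 0, a, (1 : Int))]
        else acc
      else acc) = acc ++ eF total cap trees comb index skips a := by
      simp only [eF]
      split_ifs <;> simp
    rw [hstep, List.append_assoc]

theorem aExpand_eq (total cap : Int) (trees : List Int) (comb index skips : Int)
    (acc : List Tri) :
    aExpand total cap trees comb index skips acc =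
      acc ++ (PySem.List.pyRange (index + 1) total 1).flatMap (eF total cap trees comb index skips) := by
  unfold aExpand
  exact foldl_eF total cap trees comb index skips _ acc

theorem aLevel_eq (total cap : Int) (trees : List Int) (L acc : List Tri) :
    aLevel total cap trees acc L =
      if L.any (fun s => s.1 == cap) then none
      else some (acc ++ L.flatMap (succsL total cap trees)) := by
  induction L generalizing acc with
  | nil => simp [aLevel]
  | cons s rest ih =>
    simp only [aLevel]
    by_cases hs : s.1 = cap
    · simp [hs]
    · rw [if_neg (by simpa using hs), ih, aExpand_eq]
      have hsucc : (PySem.List.pyRange (s.2.1 + 1) total 1).flatMap (eF total cap trees s.1 s.2.1 s.2.2)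
          = succsL total cap trees s := rfl
      have hany : ((s :: rest).any fun s => s.1 == cap) = (rest.any fun s => s.1 == cap) := by
        simp [hs]
      rw [hsucc, hany]
      by_cases h : (rest.any fun s => s.1 == cap) = true
      · simp [h]
      · simp only [h, Bool.false_eq_true, if_false]
        rw [List.flatMap_cons, List.append_assoc]

theorem mem_eF {total cap : Int} {trees : List Int} {comb index skips num : Int} {t : Tri} :
    t ∈ eF total cap trees comb index skips num ↔
      comb + PySem.List.pyGetD trees num 0 ≤ cap ∧
        ((num = index + 1 ∧ t = (comb + PySem.List.pyGetD trees num 0, num, 0)) ∨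
         (num ≠ index + 1 ∧ skips = 0 ∧ t = (comb + PySem.List.pyGetD trees num 0, num, 1))) := by
  simp only [eF]
  split_ifs with h1 h2 h3 <;>
    simp_all [beq_iff_eq]

theorem mem_succsL {total cap : Int} {trees : List Int} {s t : Tri} :
    t ∈ succsL total cap trees s ↔
      ∃ num, s.2.1 + 1 ≤ num ∧ num < total ∧ t ∈ eF total cap trees s.1 s.2.1 s.2.2 num := by
  simp only [succsL, List.mem_flatMap, PySem.List.mem_pyRange_one]
  constructor
  · rintro ⟨num, ⟨h1, h2⟩, h3⟩; exact ⟨num, h1, h2, h3⟩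
  · rintro ⟨num, h1, h2, h3⟩; exact ⟨num, ⟨h1, h2⟩, h3⟩

theorem succs_index {total cap : Int} {trees : List Int} {s t : Tri}
    (h : t ∈ succsL total cap trees s) : s.2.1 < t.2.1 ∧ t.2.1 < total := by
  obtain ⟨num, h1, h2, h3⟩ := mem_succsL.mp h
  obtain ⟨-, h4 | h4⟩ := mem_eF.mp h3
  · obtain ⟨-, rfl⟩ := h4; constructor <;> simp <;> omega
  · obtain ⟨-, -, rfl⟩ := h4; constructor <;> simp <;> omega

theorem levels_index {total cap : Int} {trees : List Int} :
    ∀ (k : Nat) (t : Tri), t ∈ levels total cap trees (k + 1) →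
      (k : Int) ≤ t.2.1 ∧ t.2.1 < total := by
  intro k
  induction k with
  | zero =>
    intro t ht
    simp only [levels, List.flatMap_cons, List.flatMap_nil, List.append_nil] at ht
    have := succs_index ht
    simp only [Nat.cast_zero]
    constructor
    · have : (-1 : Int) < t.2.1 := this.1
      omega
    · exact this.2
  | succ k ih =>
    intro t ht
    have ht' : t ∈ (levels total cap trees (k + 1)).flatMap (succsL total cap trees) := ht
    rw [List.mem_flatMap] at ht'
    obtain ⟨s, hs, hts⟩ := ht'
    have h1 := ih s hs
    have h2 := succs_index hts
    constructor
    · push_cast; omega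
    · exact h2.2

theorem levels_empty {total cap : Int} {trees : List Int} (m : Nat)
    (h : total.toNat + 1 ≤ m) : levels total cap trees m = [] := by
  obtain ⟨k, rfl⟩ : ∃ k, m = k + 1 := ⟨m - 1, by omega⟩
  rw [List.eq_nil_iff_forall_not_mem]
  intro t ht
  obtain ⟨h1, h2⟩ := levels_index k t ht
  have h3 : total ≤ (total.toNat : Int) := Int.self_le_toNat total
  have h4 : (total.toNat : Int) ≤ (k : Int) := by exact_mod_cast Nat.cast_le.mpr (by omega)
  omega

theorem levels_stay_empty {total cap : Int} {trees : List Int} {k : Nat}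
    (h : levels total cap trees k = []) :
    ∀ m, k ≤ m → levels total cap trees m = [] := by
  intro m hm
  obtain ⟨d, rfl⟩ : ∃ d, m = k + d := ⟨m - k, by omega⟩
  induction d with
  | zero => exact h
  | succ d ih =>
    have : levels total cap trees (k + d) = [] := ih (by omega)
    show levels total cap trees ((k + d) + 1) = []
    simp [levels, this]

theorem hasCap_iff_any {total cap : Int} {trees : List Int} {m : Nat} :
    hasCap total cap trees m ↔ (levels total cap trees m).any (fun s => s.1 == cap) = true := by
  simp [hasCap, List.any_eq_true]

theorem aLoop_found (total cap : Int) (trees : List Int) :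
    ∀ (fuel k m : Nat), k ≤ m → hasCap total cap trees m →
      (∀ j, k ≤ j → j < m → ¬ hasCap total cap trees j) → m < fuel + k →
      aLoop total cap trees fuel (levels total cap trees k) (k : Int) = (m : Int) := by
  intro fuel
  induction fuel with
  | zero => intro k m h1 _ _ h4; omega
  | succ fuel ih =>
    intro k m h1 h2 h3 h4
    have hLm : levels total cap trees m ≠ [] := by
      obtain ⟨s, hs, -⟩ := h2
      exact List.ne_nil_of_mem hs
    have hLk : levels total cap trees k ≠ [] := by
      intro hk
      exact hLm (levels_stay_empty hk m h1)
    rcases hL : levels total cap trees k with _ | ⟨a, as⟩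
    · exact absurd hL hLk
    · simp only [aLoop]
      rw [← hL, aLevel_eq]
      by_cases hk : hasCap total cap trees k
      · have hkm : k = m := by
          by_contra hne
          exact h3 k le_rfl (by omega) hk
        subst hkm
        rw [if_pos (hasCap_iff_any.mp hk)]
      · have hkm : k < m := by
          rcases eq_or_lt_of_le h1 with h | h
          · exact absurd (h ▸ h2) hk
          · exact h
        rw [if_neg (by rw [← hasCap_iff_any] at *; simpa using hk)]
        rw [hL]
        simp only [List.nil_append]
        have hlev : (a :: as).flatMap (succsL total cap trees) = levels total cap trees (k + 1) := by
          rw [← hL]; rfl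
        rw [hlev]
        have := ih (k + 1) m (by omega) h2 (fun j hj hjm => h3 j (by omega) hjm) (by omega)
        rw [show ((k : Int) + 1) = ((k + 1 : Nat) : Int) by push_cast; ring]
        exact this

theorem aLoop_none (total cap : Int) (trees : List Int) :
    ∀ (fuel k : Nat), (∀ j, k ≤ j → ¬ hasCap total cap trees j) →
      aLoop total cap trees fuel (levels total cap trees k) (k : Int) = -1 := by
  intro fuel
  induction fuel with
  | zero => intro k _; simp [aLoop]
  | succ fuel ih =>
    intro k hnone
    rcases hL : levels total cap trees k with _ | ⟨a, as⟩
    · simp [aLoop]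
    · simp only [aLoop]
      rw [← hL, aLevel_eq]
      rw [if_neg (by rw [← hasCap_iff_any] at *; simpa using hnone k le_rfl)]
      rw [hL]
      simp only [List.nil_append]
      have hlev : (a :: as).flatMap (succsL total cap trees) = levels total cap trees (k + 1) := by
        rw [← hL]; rfl
      rw [hlev]
      have := ih (k + 1) (fun j hj => hnone j (by omega))
      rw [show ((k : Int) + 1) = ((k + 1 : Nat) : Int) by push_cast; ring]
      exact this

theorem bfs_char (total cap : Int) (trees : List Int) :
    bfs total cap trees =
      match firstCap total cap trees with
      | some m => (m : Int)
      | none => -1 := by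
  unfold bfs firstCap
  have h0 : [((0 : Int), (-1 : Int), (0 : Int))] = levels total cap trees 0 := rfl
  rcases h : (List.range (total.toNat + 2)).find?
      (fun m => (levels total cap trees m).any (fun s => s.1 == cap)) with _ | m
  · have hnone := find?_range_eq_none.mp h
    rw [h0, show (0 : Int) = ((0 : Nat) : Int) by simp]
    apply aLoop_none
    intro j _
    by_cases hj : j < total.toNat + 2
    · rw [hasCap_iff_any, hnone j hj]; simp
    · rw [hasCap_iff_any, levels_empty j (by omega)]; simp
  · obtain ⟨hmn, hpm, hmin⟩ := find?_range_eq_some.mp h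
    rw [h0, show (0 : Int) = ((0 : Nat) : Int) by simp]
    apply aLoop_found total cap trees _ 0 m (by omega) (hasCap_iff_any.mpr hpm)
    · intro j _ hjm
      rw [hasCap_iff_any, hmin j hjm]; simp
    · omega

-- ===== B-side =====

-- front-first iteration of the successor relation, starting from an arbitrary list
def iterL (total cap : Int) (trees : List Int) : List Tri → Nat → List Tri
  | L, 0 => L
  | L, k + 1 => iterL total cap trees (L.flatMap (succsL total cap trees)) k

theorem mem_iterL {total cap : Int} {trees : List Int} :
    ∀ (k : Nat) (L : List Tri) (t : Tri),
      t ∈ iterL total cap trees L k ↔ ∃ s ∈ L, t ∈ iterL total cap trees [s] k := by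
  intro k
  induction k with
  | zero => intro L t; simp [iterL]
  | succ k ih =>
    intro L t
    show t ∈ iterL total cap trees (L.flatMap (succsL total cap trees)) k ↔ _
    rw [ih]
    constructor
    · rintro ⟨u, hu, htu⟩
      rw [List.mem_flatMap] at hu
      obtain ⟨s, hs, hus⟩ := hu
      refine ⟨s, hs, ?_⟩
      show t ∈ iterL total cap trees ([s].flatMap (succsL total cap trees)) k
      rw [ih]
      exact ⟨u, by simpa using hus, htu⟩
    · rintro ⟨s, hs, hts⟩
      have : t ∈ iterL total cap trees ([s].flatMap (succsL total cap trees)) k := hts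
      rw [ih] at this
      obtain ⟨u, hu, htu⟩ := this
      exact ⟨u, List.mem_flatMap.mpr ⟨s, hs, by simpa using hu⟩, htu⟩

theorem iterL_succ_back (total cap : Int) (trees : List Int) :
    ∀ (k : Nat) (L : List Tri),
      iterL total cap trees L (k + 1) =
        (iterL total cap trees L k).flatMap (succsL total cap trees) := by
  intro k
  induction k with
  | zero => intro L; rfl
  | succ k ih =>
    intro L
    show iterL total cap trees (L.flatMap (succsL total cap trees)) (k + 1) = _
    rw [ih]
    rfl

theorem levels_eq_iterL (total cap : Int) (trees : List Int) :
    ∀ k, levels total cap trees k = iterL total cap trees [(0, -1, 0)] k := by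
  intro k
  induction k with
  | zero => rfl
  | succ k ih =>
    show (levels total cap trees k).flatMap (succsL total cap trees) = _
    rw [ih, ← iterL_succ_back]

theorem reach_iff (total cap : Int) (trees : List Int) :
    ∀ (k : Nat) (comb index skips : Int),
      reachB total cap trees comb index skips k = true ↔
        ∃ t ∈ iterL total cap trees [(comb, index, skips)] k, t.1 = cap := by
  intro k
  induction k with
  | zero =>
    intro comb index skips
    show (comb == cap) = true ↔ ∃ t ∈ [((comb, index, skips) : Tri)], t.1 = cap
    simp [beq_iff_eq]
  | succ k ih =>
    intro comb index skips
    have hstep : iterL total cap trees [(comb, index, skips)] (k + 1) =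
        iterL total cap trees (succsL total cap trees (comb, index, skips)) k := by
      show iterL total cap trees ([(comb, index, skips)].flatMap (succsL total cap trees)) k = _
      simp
    rw [hstep]
    constructor
    · intro h
      simp only [reachB, List.any_eq_true, PySem.List.mem_pyRange_one] at h
      obtain ⟨num, ⟨hn1, hn2⟩, hbody⟩ := h
      by_cases hle : comb + PySem.List.pyGetD trees num 0 ≤ cap
      · rw [if_pos hle] at hbody
        by_cases hcons : num = index + 1
        · rw [if_pos (by simpa using hcons)] at hbody
          have hu : ((comb + PySem.List.pyGetD trees num 0, num, (0 : Int)) : Tri)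
              ∈ succsL total cap trees (comb, index, skips) :=
            mem_succsL.mpr ⟨num, hn1, hn2, mem_eF.mpr ⟨hle, Or.inl ⟨hcons, rfl⟩⟩⟩
          obtain ⟨t, ht1, ht2⟩ := (ih _ num 0).mp hbody
          refine ⟨t, ?_, ht2⟩
          rw [mem_iterL]
          exact ⟨_, hu, ht1⟩
        · rw [if_neg (by simpa using hcons)] at hbody
          by_cases hsk : skips = 0
          · rw [if_pos (by simpa using hsk)] at hbody
            have hu : ((comb + PySem.List.pyGetD trees num 0, num, (1 : Int)) : Tri)
                ∈ succsL total cap trees (comb, index, skips) :=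
              mem_succsL.mpr ⟨num, hn1, hn2, mem_eF.mpr ⟨hle, Or.inr ⟨hcons, hsk, rfl⟩⟩⟩
            obtain ⟨t, ht1, ht2⟩ := (ih _ num 1).mp hbody
            refine ⟨t, ?_, ht2⟩
            rw [mem_iterL]
            exact ⟨_, hu, ht1⟩
          · rw [if_neg (by simpa using hsk)] at hbody
            exact absurd hbody (by simp)
      · rw [if_neg hle] at hbody
        exact absurd hbody (by simp)
    · rintro ⟨t, ht1, ht2⟩
      rw [mem_iterL] at ht1
      obtain ⟨u, hu, htu⟩ := ht1
      obtain ⟨num, hn1, hn2, hE⟩ := mem_succsL.mp hu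
      obtain ⟨hle, hcase⟩ := mem_eF.mp hE
      simp only [reachB, List.any_eq_true, PySem.List.mem_pyRange_one]
      refine ⟨num, ⟨hn1, hn2⟩, ?_⟩
      rw [if_pos hle]
      rcases hcase with ⟨hcons, rfl⟩ | ⟨hcons, hsk, rfl⟩
      · rw [if_pos (by simpa using hcons)]
        exact (ih _ num 0).mpr ⟨t, htu, ht2⟩
      · rw [if_neg (by simpa using hcons), if_pos (by simpa using hsk)]
        exact (ih _ num 1).mpr ⟨t, htu, ht2⟩

theorem reach_init_eq (total cap : Int) (trees : List Int) (k : Nat) :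
    reachB total cap trees 0 (-1) 0 k =
      (levels total cap trees k).any (fun s => s.1 == cap) := by
  rcases h : (levels total cap trees k).any (fun s => s.1 == cap) with _ | _
  · rw [Bool.eq_false_iff]
    intro hr
    obtain ⟨t, ht1, ht2⟩ := (reach_iff total cap trees k 0 (-1) 0).mp hr
    rw [← levels_eq_iterL] at ht1
    have : (levels total cap trees k).any (fun s => s.1 == cap) = true :=
      List.any_eq_true.mpr ⟨t, ht1, by simpa using ht2⟩
    rw [h] at this
    exact absurd this (by simp)
  · obtain ⟨t, ht1, ht2⟩ := List.any_eq_true.mp h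
    apply (reach_iff total cap trees k 0 (-1) 0).mpr
    rw [← levels_eq_iterL]
    exact ⟨t, ht1, by simpa using ht2⟩

theorem bfs_alt_char (total cap : Int) (trees : List Int) :
    bfs_alt total cap trees =
      match firstCap total cap trees with
      | some m => (m : Int)
      | none => -1 := by
  unfold bfs_alt firstCap
  have hmax : (max total 0).toNat = total.toNat := by omega
  have hpred : (fun k => reachB total cap trees 0 (-1) 0 k) =
      (fun k => (levels total cap trees k).any (fun s => s.1 == cap)) :=
    funext (reach_init_eq total cap trees)
  rw [hmax, hpred]
  -- the extra index total.toNat + 1 in A's search range never fires: that level is empty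
  have htop : (levels total cap trees (total.toNat + 1)).any (fun s => s.1 == cap) = false := by
    rw [levels_empty (total.toNat + 1) (by omega)]
    rfl
  rcases h : (List.range (total.toNat + 2)).find?
      (fun m => (levels total cap trees m).any (fun s => s.1 == cap)) with _ | m
  · have hnone := find?_range_eq_none.mp h
    rw [find?_range_eq_none.mpr (fun k hk => hnone k (by omega))]
  · obtain ⟨hmn, hpm, hmin⟩ := find?_range_eq_some.mp h
    have hm' : m < total.toNat + 1 := by
      by_contra hge
      have : m = total.toNat + 1 := by omega
      rw [this, htop] at hpm
      exact absurd hpm (by simp)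
    rw [find?_range_eq_some.mpr ⟨hm', hpm, hmin⟩]

-- ===== VERDICT (by name: the statement is the Claim_ definition above) =====
theorem bfs_spec : Claim_equal_bfs := by
  intro total cap trees _ _
  unfold Spec_bfs
  rw [bfs_char, bfs_alt_char]
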